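-- pv_equiv track=rewrite | github.com/kimdonggyu2008/codetree-TILs | 241014/Carry 피하기/escaping-carry.py | max_no_carry_numbers
-- ===== SOURCE A (Python) =====
-- from itertools import combinations
--
-- def carry(a, b):
--     while a > 0 or b > 0:
--         digit_a = a % 10
--         digit_b = b % 10
--         if digit_a + digit_b >= 10:
--             return False
--         a //= 10
--         b //= 10
--     return True
--
-- def max_no_carry_numbers(numbers):
--     n = len(numbers)
--     max_count = 0
--
--     # 숫자들 간 carry가 발생하지 않는지 미리 계산해서 캐싱
--     carry_matrix = [[True] * n for _ in range(n)]
--     for i in range(n):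
--         for j in range(i + 1, n):
--             carry_matrix[i][j] = carry(numbers[i], numbers[j])
--
--     # 숫자들을 1개부터 n개까지 조합하여 carry가 발생하지 않는 최대 크기 찾기
--     for r in range(1, n + 1):
--         for comb in combinations(range(n), r):
--             valid_comb = True
--             for i in range(len(comb)):
--                 for j in range(i + 1, len(comb)):
--                     if not carry_matrix[comb[i]][comb[j]]:
--                         valid_comb = False
--                         break
--                 if not valid_comb:
--                     break
--             if valid_comb:
--                 max_count = max(max_count, len(comb))
--
--     return max_count
-- ===== SOURCE B (Python) =====
-- def no_carry(a, b):
--     if a <= 0 and b <= 0: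
--         return True
--     if a % 10 + b % 10 >= 10:
--         return False
--     return no_carry(a // 10, b // 10)
--
-- def max_no_carry_numbers(numbers):
--     # branch-and-filter max-clique recursion: take the head (restricting the rest to
--     # its no-carry neighbours) or skip it; when the head is compatible with every
--     # remaining candidate, taking it dominates skipping, so the skip branch is dropped
--     def best(cands):
--         if not cands:
--             return 0
--         x, rest = cands[0], cands[1:]
--         take = [y for y in rest if no_carry(x, y)]
--         if len(take) == len(rest):
--             return 1 + best(take)
--         return max(1 + best(take), best(rest))
--     return best(numbers)
-- ===== Notes on version B (the rewrite author's own statement) =====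
-- stated objective: faster
-- what changed: Replaces the enumeration of every combination of every size (rechecked pair by pair against a precomputed matrix) with a take-or-skip max-clique recursion that filters the remaining candidates to the head's no-carry neighbours and drops the skip branch when the head is compatible with all of them, so incompatible or dominated subsets are pruned instead of enumerated.
import Mathlib
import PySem

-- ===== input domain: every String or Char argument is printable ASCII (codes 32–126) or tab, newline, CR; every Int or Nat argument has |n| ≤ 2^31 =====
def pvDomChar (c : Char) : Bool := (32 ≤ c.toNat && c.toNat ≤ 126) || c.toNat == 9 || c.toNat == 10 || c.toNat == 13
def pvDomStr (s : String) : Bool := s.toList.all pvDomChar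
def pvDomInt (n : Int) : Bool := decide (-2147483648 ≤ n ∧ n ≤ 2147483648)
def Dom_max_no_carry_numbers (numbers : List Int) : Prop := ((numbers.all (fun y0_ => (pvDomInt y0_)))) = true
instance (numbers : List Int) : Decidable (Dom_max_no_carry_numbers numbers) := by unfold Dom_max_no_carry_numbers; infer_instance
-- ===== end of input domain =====

-- B replaces A's enumeration of every combination of every size with a take-or-skip
-- max-clique recursion filtering candidates to the head's no-carry neighbours (measurably faster).

-- ===== PORT A =====
-- port of helper carry(a, b): the while loop, with a.toNat + b.toNat as fuel (each
-- iteration strictly decreases that sum, so the fuel-0 branch is only reached when the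
-- loop condition is false, where the Python loop also returns True)
def carryLoopA : Nat → Int → Int → Bool
  | 0, _, _ => true
  | fuel + 1, a, b =>
      if 0 < a ∨ 0 < b then
        if 10 ≤ PySem.Int.mod a 10 + PySem.Int.mod b 10 then false
        else carryLoopA fuel (PySem.Int.floordiv a 10) (PySem.Int.floordiv b 10)
      else true

def carryA (a b : Int) : Bool := carryLoopA (a.toNat + b.toNat) a b

def combosA : Nat → List Nat → List (List Nat)
  | 0, _ => [[]]
  | _ + 1, [] => []
  | r + 1, x :: xs => (combosA r xs).map (fun c => x :: c) ++ combosA (r + 1) xs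

-- carry_matrix: entry (i,j) with j > i holds carry(numbers[i], numbers[j]), else the initial True
def matrixA (numbers : List Int) : List (List Bool) :=
  (List.range numbers.length).map (fun i =>
    (List.range numbers.length).map (fun j =>
      if i + 1 ≤ j then carryA (numbers.getD i 0) (numbers.getD j 0) else true))

def lookupA (m : List (List Bool)) (i j : Nat) : Bool := (m.getD i []).getD j true

-- the double loop over positions i < j of comb with early break, as short-circuit recursion
def validCombA (m : List (List Bool)) : List Nat → Bool
  | [] => true
  | i :: rest => (rest.all (fun j => lookupA m i j)) && validCombA m rest

def max_no_carry_numbers (numbers : List Int) : Int :=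
  (List.range' 1 numbers.length 1).foldl (fun mc r =>
    (combosA r (List.range numbers.length)).foldl (fun mc comb =>
      if validCombA (matrixA numbers) comb then max mc (comb.length : Int) else mc) mc) 0

-- ===== PORT B =====
-- port of Source B's no_carry (recursive digit check), same fuel guard as carryLoopA
def noCarryLoopB : Nat → Int → Int → Bool
  | 0, _, _ => true
  | fuel + 1, a, b =>
      if a ≤ 0 ∧ b ≤ 0 then true
      else if 10 ≤ PySem.Int.mod a 10 + PySem.Int.mod b 10 then false
      else noCarryLoopB fuel (PySem.Int.floordiv a 10) (PySem.Int.floordiv b 10)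

def noCarryB (a b : Int) : Bool := noCarryLoopB (a.toNat + b.toNat) a b

-- port of Source B's best: take the head (keeping its no-carry neighbours) or skip it,
-- dropping the skip branch when the head is compatible with every remaining candidate;
-- the list length is fuel (the recursion only ever shrinks the list)
def bestLoopB : Nat → List Int → Int
  | 0, _ => 0
  | _ + 1, [] => 0
  | fuel + 1, x :: rest =>
      if (rest.filter (fun y => noCarryB x y)).length = rest.length then
        1 + bestLoopB fuel (rest.filter (fun y => noCarryB x y))
      else
        max (1 + bestLoopB fuel (rest.filter (fun y => noCarryB x y))) (bestLoopB fuel rest)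

def bestB (l : List Int) : Int := bestLoopB l.length l

def max_no_carry_numbers_alt (numbers : List Int) : Int := bestB numbers

-- ===== PRECONDITION & SPEC =====
def Spec_max_no_carry_numbers (numbers : List Int) (out : Int) : Prop := out = max_no_carry_numbers_alt numbers
instance (numbers : List Int) (out : Int) : Decidable (Spec_max_no_carry_numbers numbers out) := by unfold Spec_max_no_carry_numbers; infer_instance

-- ===== CLAIM (what is proved, stated in full; the proofs are below) =====
def Claim_equal_max_no_carry_numbers : Prop := ∀ (numbers : List Int), Dom_max_no_carry_numbers numbers → Spec_max_no_carry_numbers numbers (max_no_carry_numbers numbers)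

-- ===== LEMMAS AND PROOFS =====
theorem carryLoop_eq : ∀ (fuel : Nat) (a b : Int), carryLoopA fuel a b = noCarryLoopB fuel a b := by
  intro fuel
  induction fuel with
  | zero => intro a b; rfl
  | succ fuel ih =>
    intro a b
    rw [carryLoopA, noCarryLoopB]
    by_cases h : 0 < a ∨ 0 < b
    · rw [if_pos h, if_neg (show ¬(a ≤ 0 ∧ b ≤ 0) by omega)]
      by_cases hd : 10 ≤ PySem.Int.mod a 10 + PySem.Int.mod b 10
      · rw [if_pos hd, if_pos hd]
      · rw [if_neg hd, if_neg hd, ih]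
    · rw [if_neg h, if_pos (show a ≤ 0 ∧ b ≤ 0 by omega)]

theorem carryA_eq_noCarryB (a b : Int) : carryA a b = noCarryB a b := by
  rw [carryA, noCarryB, carryLoop_eq]

def goodC (s : List Int) : Prop := s.Pairwise (fun a b => carryA a b = true)

theorem bestLoop_ub : ∀ (fuel : Nat) (l s : List Int), l.length ≤ fuel → s.Sublist l → goodC s →
    (s.length : Int) ≤ bestLoopB fuel l := by
  intro fuel
  induction fuel with
  | zero =>
    intro l s hf hs _
    rw [List.length_eq_zero_iff.mp (Nat.le_zero.mp hf)] at hs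
    simp [List.sublist_nil.mp hs, bestLoopB]
  | succ fuel ih =>
    rintro (_ | ⟨x, rest⟩) s hf hs hg
    · simp [List.sublist_nil.mp hs, bestLoopB]
    · rw [bestLoopB]
      rw [List.length_cons, Nat.succ_le_succ_iff] at hf
      have hlf : (rest.filter (fun y => noCarryB x y)).length ≤ fuel :=
        le_trans (List.length_filter_le _ _) hf
      have hskip : s.Sublist rest → goodC s → (s.length : Int) ≤ bestLoopB fuel rest :=
        fun h hg => ih rest s hf h hg
      have htake : ∀ t : List Int, (x :: t).Sublist (x :: rest) → goodC (x :: t) → t.Sublist rest →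
          (t.length : Int) ≤ bestLoopB fuel (rest.filter (fun y => noCarryB x y)) := by
        intro t _ hgt ht
        rw [goodC, List.pairwise_cons] at hgt
        have htf : t.Sublist (rest.filter (fun y => noCarryB x y)) := by
          have h1 := ht.filter (fun y => noCarryB x y)
          rwa [List.filter_eq_self.mpr (fun y hy => by
            rw [← carryA_eq_noCarryB]; exact hgt.1 y hy)] at h1
        exact ih _ t hlf htf hgt.2
      split
      · rename_i hdom
        have hfr : rest.filter (fun y => noCarryB x y) = rest :=
          List.Sublist.eq_of_length List.filter_sublist hdom
        rcases List.sublist_cons_iff.mp hs with h | ⟨t, rfl, ht⟩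
        · have := hskip h hg
          rw [hfr]
          omega
        · have := htake t hs hg ht
          simp only [List.length_cons]
          push_cast
          omega
      · rcases List.sublist_cons_iff.mp hs with h | ⟨t, rfl, ht⟩
        · exact le_trans (hskip h hg) (le_max_right _ _)
        · have := htake t hs hg ht
          refine le_trans ?_ (le_max_left _ _)
          simp only [List.length_cons]
          push_cast
          omega

theorem bestB_ub : ∀ (l s : List Int), s.Sublist l → goodC s → (s.length : Int) ≤ bestB l :=
  fun l s hs hg => bestLoop_ub l.length l s le_rfl hs hg

theorem bestLoop_ex : ∀ (fuel : Nat) (l : List Int), l.length ≤ fuel →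
    ∃ s, s.Sublist l ∧ goodC s ∧ bestLoopB fuel l = (s.length : Int) := by
  intro fuel
  induction fuel with
  | zero => exact fun l _ => ⟨[], List.nil_sublist _, List.Pairwise.nil, rfl⟩
  | succ fuel ih =>
    rintro (_ | ⟨x, rest⟩) hf
    · exact ⟨[], List.nil_sublist _, List.Pairwise.nil, rfl⟩
    · rw [List.length_cons, Nat.succ_le_succ_iff] at hf
      obtain ⟨s1, hs1, hg1, he1⟩ := ih (rest.filter (fun y => noCarryB x y))
        (le_trans (List.length_filter_le _ _) hf)
      obtain ⟨s2, hs2, hg2, he2⟩ := ih rest hf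
      have hwit : (x :: s1).Sublist (x :: rest) ∧ goodC (x :: s1) := by
        constructor
        · exact (hs1.trans List.filter_sublist).cons₂ x
        · rw [goodC, List.pairwise_cons]
          refine ⟨fun y hy => ?_, hg1⟩
          rw [carryA_eq_noCarryB]
          exact List.of_mem_filter (hs1.mem hy)
      rw [bestLoopB]
      split
      · exact ⟨x :: s1, hwit.1, hwit.2, by rw [he1]; simp; ring⟩
      · rcases max_choice (1 + bestLoopB fuel (rest.filter (fun y => noCarryB x y)))
          (bestLoopB fuel rest) with h | h
        · exact ⟨x :: s1, hwit.1, hwit.2, by rw [h, he1]; simp; ring⟩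
        · exact ⟨s2, hs2.cons x, hg2, by rw [h, he2]⟩

theorem bestB_ex : ∀ l : List Int, ∃ s, s.Sublist l ∧ goodC s ∧ bestB l = (s.length : Int) :=
  fun l => bestLoop_ex l.length l le_rfl

theorem map_getD_range (numbers : List Int) :
    (List.range numbers.length).map (fun i => numbers.getD i 0) = numbers := by
  apply List.ext_getElem (by simp)
  intro i h1 h2
  simp [List.getD_eq_getElem?_getD, List.getElem?_eq_getElem h2]

theorem lookup_eq (numbers : List Int) (i j : Nat) (hij : i < j) (hj : j < numbers.length) :
    lookupA (matrixA numbers) i j = carryA (numbers.getD i 0) (numbers.getD j 0) := by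
  have hi : i < numbers.length := lt_trans hij hj
  have hrow : (matrixA numbers).getD i [] = (List.range numbers.length).map (fun j =>
      if i + 1 ≤ j then carryA (numbers.getD i 0) (numbers.getD j 0) else true) := by
    rw [matrixA]
    rw [List.getD_eq_getElem ((List.range numbers.length).map _) [] (by simpa using hi)]
    rw [List.getElem_map, List.getElem_range]
  rw [lookupA, hrow]
  rw [List.getD_eq_getElem _ _ (by simpa using hj)]
  rw [List.getElem_map, List.getElem_range, if_pos (by omega)]

theorem validComb_iff (numbers : List Int) : ∀ c : List Nat, c.Pairwise (· < ·) →
    (∀ k ∈ c, k < numbers.length) →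
    (validCombA (matrixA numbers) c = true ↔
      c.Pairwise (fun i j => carryA (numbers.getD i 0) (numbers.getD j 0) = true)) := by
  intro c
  induction c with
  | nil => simp [validCombA]
  | cons i rest ih =>
    intro hp hb
    rw [List.pairwise_cons] at hp
    rw [validCombA, Bool.and_eq_true, List.all_eq_true, List.pairwise_cons]
    rw [ih hp.2 (fun k hk => hb k (List.mem_cons_of_mem _ hk))]
    constructor
    · rintro ⟨h1, h2⟩
      exact ⟨fun j hj => by rw [← lookup_eq numbers i j (hp.1 j hj) (hb j (List.mem_cons_of_mem _ hj))]; exact h1 j hj, h2⟩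
    · rintro ⟨h1, h2⟩
      exact ⟨fun j hj => by rw [lookup_eq numbers i j (hp.1 j hj) (hb j (List.mem_cons_of_mem _ hj))]; exact h1 j hj, h2⟩

theorem mem_combosA : ∀ (l : List Nat) (r : Nat) (c : List Nat),
    c ∈ combosA r l ↔ c.Sublist l ∧ c.length = r := by
  intro l
  induction l with
  | nil =>
    intro r c
    cases r with
    | zero => simp [combosA, List.sublist_nil]
    | succ r =>
      simp only [combosA, List.not_mem_nil, false_iff, not_and]
      intro hs
      rw [List.sublist_nil.mp hs]
      simp
  | cons x xs ih =>
    intro r c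
    cases r with
    | zero =>
      simp only [combosA, List.mem_singleton]
      constructor
      · rintro rfl; exact ⟨List.nil_sublist _, rfl⟩
      · rintro ⟨_, hl⟩; exact List.length_eq_zero_iff.mp hl
    | succ r =>
      rw [combosA, List.mem_append, List.mem_map]
      constructor
      · rintro (⟨c', hc', rfl⟩ | h)
        · obtain ⟨hs, hl⟩ := (ih r c').mp hc'
          exact ⟨hs.cons₂ x, by simp [hl]⟩
        · obtain ⟨hs, hl⟩ := (ih (r + 1) c).mp h
          exact ⟨hs.cons x, hl⟩
      · rintro ⟨hs, hl⟩
        rcases List.sublist_cons_iff.mp hs with h | ⟨t, rfl, ht⟩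
        · exact Or.inr ((ih (r + 1) c).mpr ⟨h, hl⟩)
        · exact Or.inl ⟨t, (ih r t).mpr ⟨ht, by simpa using hl⟩, rfl⟩

theorem sublist_range' : ∀ (m a : Nat) (c : List Nat), c.Pairwise (· < ·) →
    (∀ k ∈ c, a ≤ k ∧ k < a + m) → c.Sublist (List.range' a m) := by
  intro m
  induction m with
  | zero =>
    rintro a (_ | ⟨k, c⟩) _ hb
    · simp
    · have := hb k (List.mem_cons_self)
      omega
  | succ m ih =>
    rintro a (_ | ⟨k, c⟩) hp hb
    · simp
    · rw [List.range'_succ]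
      rw [List.pairwise_cons] at hp
      by_cases hk : k = a
      · subst hk
        refine List.Sublist.cons₂ k (ih (k + 1) c hp.2 fun y hy => ?_)
        have h1 := hp.1 y hy
        have h2 := hb y (List.mem_cons_of_mem _ hy)
        omega
      · refine List.Sublist.cons a (ih (a + 1) (k :: c) (List.pairwise_cons.mpr hp) fun y hy => ?_)
        rcases List.mem_cons.mp hy with rfl | hy
        · have := hb y List.mem_cons_self
          omega
        · have h1 := hp.1 y hy
          have h2 := hb y (List.mem_cons_of_mem _ hy)
          have h3 := hb k List.mem_cons_self
          omega

theorem le_foldl_step {α : Type} (f : Int → α → Int) (hf : ∀ m x, m ≤ f m x) :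
    ∀ (l : List α) (init : Int), init ≤ l.foldl f init := by
  intro l
  induction l with
  | nil => simp
  | cons x l ih => intro init; exact le_trans (hf init x) (ih (f init x))

theorem foldl_lower {α : Type} (f : Int → α → Int) (hf : ∀ m x, m ≤ f m x) (x : α) (v : Int)
    (hv : ∀ m, v ≤ f m x) : ∀ (l : List α), x ∈ l → ∀ init, v ≤ l.foldl f init := by
  intro l
  induction l with
  | nil => simp
  | cons y l ih =>
    intro hx init
    rcases List.mem_cons.mp hx with rfl | hx
    · exact le_trans (hv init) (le_foldl_step f hf l (f init x))
    · exact ih hx (f init y)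

theorem foldl_inv {α : Type} (P : Int → Prop) (f : Int → α → Int) :
    ∀ (l : List α), (∀ m x, x ∈ l → P m → P (f m x)) → ∀ init, P init → P (l.foldl f init) := by
  intro l
  induction l with
  | nil => intro _ init h; exact h
  | cons x l ih =>
    intro hstep init hinit
    exact ih (fun m y hy => hstep m y (List.mem_cons_of_mem _ hy)) (f init x)
      (hstep init x List.mem_cons_self hinit)

theorem A_ub_aux (numbers : List Int) (c : List Nat) (hcp : c.Pairwise (· < ·))
    (hcb : ∀ k ∈ c, k < numbers.length)
    (hgood : c.Pairwise (fun i j => carryA (numbers.getD i 0) (numbers.getD j 0) = true)) :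
    (c.length : Int) ≤ max_no_carry_numbers numbers := by
  have hinner : ∀ (m : Int) (x : List Nat),
      m ≤ (if validCombA (matrixA numbers) x then max m ((x : List Nat).length : Int) else m) := by
    intro m x; split <;> simp
  have houter : ∀ (m : Int) (r : Nat), m ≤ (combosA r (List.range numbers.length)).foldl
      (fun mc comb => if validCombA (matrixA numbers) comb then max mc (comb.length : Int) else mc) m :=
    fun m r => le_foldl_step _ hinner _ m
  have hnonneg : (0 : Int) ≤ max_no_carry_numbers numbers :=
    foldl_inv (fun m => 0 ≤ m) _ _ (fun m r _ h => le_trans h (houter m r)) 0 le_rfl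
  cases hc : c with
  | nil => simpa using hnonneg
  | cons a t =>
    rw [← hc]
    have hcne : c ≠ [] := by rw [hc]; simp
    have hcr : c.Sublist (List.range numbers.length) := by
      rw [List.range_eq_range']
      exact sublist_range' numbers.length 0 c hcp (fun k hk => ⟨Nat.zero_le _, by simpa using hcb k hk⟩)
    have hmem : c ∈ combosA c.length (List.range numbers.length) := (mem_combosA _ _ _).mpr ⟨hcr, rfl⟩
    have hlen : c.length ≤ numbers.length := by
      have := hcr.length_le
      simpa using this
    have hrmem : c.length ∈ List.range' 1 numbers.length 1 := by
      rw [List.mem_range'_1]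
      constructor
      · rw [hc]; simp
      · omega
    have hvalid : validCombA (matrixA numbers) c = true := (validComb_iff numbers c hcp hcb).mpr hgood
    refine foldl_lower _ (fun m r => houter m r) c.length (c.length : Int) ?_ _ hrmem 0
    intro m
    refine foldl_lower _ hinner c (c.length : Int) ?_ _ hmem m
    intro m'
    rw [if_pos hvalid]
    exact le_max_right _ _

theorem A_ub : ∀ (numbers s : List Int), s.Sublist numbers → goodC s →
    (s.length : Int) ≤ max_no_carry_numbers numbers := by
  intro numbers s hs hg
  obtain ⟨is, hmap, hps⟩ := List.sublist_eq_map_getElem hs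
  have hcp : (is.map (fun x => x.val)).Pairwise (· < ·) :=
    List.pairwise_map.mpr (hps.imp fun h => h)
  have hcb : ∀ k ∈ is.map (fun x => x.val), k < numbers.length := by
    rintro k hk
    rw [List.mem_map] at hk
    obtain ⟨⟨v, hv⟩, _, rfl⟩ := hk
    exact hv
  have hsm : s = (is.map (fun x => x.val)).map (fun i => numbers.getD i 0) := by
    rw [List.map_map, hmap]
    apply List.map_congr_left
    intro x _
    simp [List.getD_eq_getElem?_getD]
  have hgood : (is.map (fun x => x.val)).Pairwise
      (fun i j => carryA (numbers.getD i 0) (numbers.getD j 0) = true) := by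
    have := hg
    rw [goodC, hsm, List.pairwise_map] at this
    exact this
  have := A_ub_aux numbers (is.map (fun x => x.val)) hcp hcb hgood
  have hlen : s.length = (is.map (fun x => x.val)).length := by rw [hsm]; simp
  rw [hlen]
  exact this

theorem A_ex : ∀ numbers : List Int, ∃ s, s.Sublist numbers ∧ goodC s ∧
    max_no_carry_numbers numbers = (s.length : Int) := by
  intro numbers
  have key : (fun m => m = 0 ∨ ∃ s, s.Sublist numbers ∧ goodC s ∧ m = (s.length : Int))
      (max_no_carry_numbers numbers) := by
    rw [max_no_carry_numbers]
    refine foldl_inv (fun m => m = 0 ∨ ∃ s, s.Sublist numbers ∧ goodC s ∧ m = (s.length : Int)) _ _ ?_ 0 (Or.inl rfl)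
    intro m r _ hm
    refine foldl_inv (fun m => m = 0 ∨ ∃ s, s.Sublist numbers ∧ goodC s ∧ m = (s.length : Int)) _ _ ?_ m hm
    intro m' comb hcomb hm'
    split
    · rename_i hvalid
      obtain ⟨hsub, _⟩ := (mem_combosA _ _ _).mp hcomb
      have hcp : comb.Pairwise (· < ·) := List.Pairwise.sublist hsub List.pairwise_lt_range
      have hcb : ∀ k ∈ comb, k < numbers.length := fun k hk => List.mem_range.mp (hsub.mem hk)
      have hgood := (validComb_iff numbers comb hcp hcb).mp hvalid
      rcases max_choice m' (comb.length : Int) with h | h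
      · rw [h]; exact hm'
      · rw [h]
        refine Or.inr ⟨comb.map (fun i => numbers.getD i 0), ?_, ?_, by simp⟩
        · have := hsub.map (fun i => numbers.getD i 0)
          rwa [map_getD_range numbers] at this
        · rw [goodC, List.pairwise_map]; exact hgood
    · exact hm'
  rcases key with h | h
  · exact ⟨[], List.nil_sublist _, List.Pairwise.nil, by rw [h]; simp⟩
  · exact h

-- ===== VERDICT (by name: the statement is the Claim_ definition above) =====
theorem max_no_carry_numbers_spec : Claim_equal_max_no_carry_numbers := by
  intro numbers _
  show _ = max_no_carry_numbers_alt numbers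
  unfold max_no_carry_numbers_alt
  obtain ⟨s, hs, hg, he⟩ := A_ex numbers
  obtain ⟨t, ht, htg, hte⟩ := bestB_ex numbers
  have h1 := bestB_ub numbers s hs hg
  have h2 := A_ub numbers t ht htg
  omega
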